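-- pv_equiv track=rewrite | github.com/hbyyy/codingTest | 알고리즘/프로그래머스/2019카카오인턴/징검다리건너기.py | find_zeroblock
-- ===== SOURCE A (Python) =====
-- def find_zeroblock(tmp, k):
--     zero_count = 0
--     for i in tmp:
--         if i == 0:
--             zero_count += 1
--
--             if zero_count == k:
--                 return True
--         else:
--             zero_count = 0
--     return False
-- ===== SOURCE B (Python) =====
-- def find_zeroblock(tmp, k):
--     # need at least one zero, so k <= 0 can never be satisfied
--     if k <= 0:
--         return False
--     i, n = 0, len(tmp)
--     while i < n:
--         j = i
--         while j < n and tmp[j] == 0: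
--             j += 1
--         if j - i >= k:
--             return True
--         i = j + 1
--     return False
-- ===== Notes on version B (the rewrite author's own statement) =====
-- stated objective: alternative
-- what changed: Replaces the element-by-element counter with early return by a run-skipping scan: measure each maximal leading zero-run, test its length against k, and drop past the run and the following non-zero; an explicit k <= 0 guard states that a positive run is required.
import Mathlib
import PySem

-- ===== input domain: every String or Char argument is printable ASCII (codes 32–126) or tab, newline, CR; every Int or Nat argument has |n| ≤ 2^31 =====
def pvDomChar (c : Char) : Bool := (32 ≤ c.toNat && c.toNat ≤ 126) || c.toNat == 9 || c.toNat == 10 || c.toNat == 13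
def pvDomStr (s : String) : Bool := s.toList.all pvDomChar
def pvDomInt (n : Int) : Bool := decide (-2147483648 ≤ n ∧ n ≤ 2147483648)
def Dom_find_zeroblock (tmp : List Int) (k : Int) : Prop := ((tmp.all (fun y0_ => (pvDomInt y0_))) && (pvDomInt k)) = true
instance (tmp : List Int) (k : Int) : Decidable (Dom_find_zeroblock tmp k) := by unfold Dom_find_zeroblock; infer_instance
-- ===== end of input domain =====

-- ===== PORT A =====
-- A: single pass keeping a running zero counter, early True when it hits k.
def pvAloop (k : Int) : List Int → Int → Bool
  | [], _ => false
  | x :: xs, c =>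
    if x = 0 then
      let c' := c + 1
      if c' = k then true else pvAloop k xs c'
    else pvAloop k xs 0

def find_zeroblock (tmp : List Int) (k : Int) : Bool := pvAloop k tmp 0

-- ===== PORT B =====
-- B: run-skipping index scan — measure each maximal zero-run [i, j) and jump past it, instead of a per-element counter (alternative decomposition, same cost).
lemma pvRunEnd_helper (n j : Nat) (h : j < n) : n - (j + 1) < n - j := by omega

def pvRunEnd (tmp : List Int) (n : Nat) (j : Nat) : Nat :=
  if h : j < n ∧ tmp.getD j 1 = 0 then pvRunEnd tmp n (j + 1) else j
termination_by n - j
decreasing_by exact pvRunEnd_helper n j h.1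

lemma pvRunEnd_ge (tmp : List Int) (n j : Nat) : j ≤ pvRunEnd tmp n j := by
  fun_induction pvRunEnd tmp n j with
  | case1 j h ih => omega
  | case2 j h => omega

def pvLoopB (tmp : List Int) (n : Nat) (k : Int) (i : Nat) : Bool :=
  if h : i < n then
    let j := pvRunEnd tmp n i
    if ((j : Int) - (i : Int)) ≥ k then true
    else pvLoopB tmp n k (j + 1)
  else false
termination_by n - i
decreasing_by have := pvRunEnd_ge tmp n i; omega

def find_zeroblock_alt (tmp : List Int) (k : Int) : Bool :=
  if k ≤ 0 then false else pvLoopB tmp tmp.length k 0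

-- ===== PRECONDITION & SPEC =====
def Spec_find_zeroblock (tmp : List Int) (k : Int) (out : Bool) : Prop := out = find_zeroblock_alt tmp k
instance (tmp : List Int) (k : Int) (out : Bool) : Decidable (Spec_find_zeroblock tmp k out) := by unfold Spec_find_zeroblock; infer_instance

-- ===== CLAIM (what is proved, stated in full; the proofs are below) =====
def Claim_equal_find_zeroblock : Prop := ∀ (tmp : List Int) (k : Int), Dom_find_zeroblock tmp k → Spec_find_zeroblock tmp k (find_zeroblock tmp k)

-- ===== LEMMAS AND PROOFS =====

def pvLeadZeros : List Int → Nat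
  | [] => 0
  | x :: xs => if x = 0 then pvLeadZeros xs + 1 else 0

def pvGoB (k : Int) (block : List Int) : Bool :=
  match block with
  | [] => false
  | x :: xs =>
    let run := pvLeadZeros (x :: xs)
    if (run : Int) ≥ k then true
    else pvGoB k ((x :: xs).drop (run + 1))
termination_by block.length
decreasing_by simp


lemma pvAloop_nonpos (k : Int) (hk : k ≤ 0) : ∀ (xs : List Int) (c : Int), 0 ≤ c → pvAloop k xs c = false := by
  intro xs
  induction xs with
  | nil => intro c _; rfl
  | cons x xs ih =>
    intro c hc
    simp only [pvAloop]
    split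
    · have : ¬ (c + 1 = k) := by omega
      simp only [this, if_false]
      exact ih (c + 1) (by omega)
    · exact ih 0 le_rfl

lemma pvGoB_nil (k : Int) : pvGoB k [] = false := by rw [pvGoB.eq_def]

lemma pvGoB_unfold (k : Int) (hk : 1 ≤ k) (xs : List Int) :
    pvGoB k xs = (decide ((pvLeadZeros xs : Int) ≥ k) || pvGoB k (xs.drop (pvLeadZeros xs + 1))) := by
  cases xs with
  | nil =>
    simp [pvGoB_nil, pvLeadZeros]
    omega
  | cons y ys =>
    rw [pvGoB.eq_def]
    by_cases h : ((pvLeadZeros (y :: ys) : Int) ≥ k) <;> simp [h]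


lemma pvGoB_unfold' (k : Int) (xs : List Int) (hx : xs ≠ []) :
    pvGoB k xs = (if ((pvLeadZeros xs : Int) ≥ k) then true else pvGoB k (xs.drop (pvLeadZeros xs + 1))) := by
  cases xs with
  | nil => exact absurd rfl hx
  | cons y ys => rw [pvGoB.eq_def]

lemma pvAloop_goB (k : Int) (hk : 1 ≤ k) :
    ∀ (xs : List Int) (c : Int), 0 ≤ c → c < k →
      pvAloop k xs c = (decide ((c + (pvLeadZeros xs : Int)) ≥ k) || pvGoB k (xs.drop (pvLeadZeros xs + 1))) := by
  intro xs
  induction xs with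
  | nil =>
    intro c _ hck
    simp [pvAloop, pvLeadZeros, pvGoB_nil]
    omega
  | cons x xs ih =>
    intro c hc hck
    simp only [pvAloop, pvLeadZeros]
    by_cases hx : x = 0
    · simp only [if_pos hx]
      by_cases hck' : c + 1 = k
      · rw [if_pos hck']
        symm
        simp only [Bool.or_eq_true, decide_eq_true_eq]
        left
        push_cast
        omega
      · rw [if_neg hck', ih (c + 1) (by omega) (by omega), List.drop_succ_cons]
        congr 1
        simp only [decide_eq_decide]
        push_cast
        omega
    · simp only [if_neg hx]
      simp only [Nat.cast_zero, add_zero, zero_add, List.drop_succ_cons, List.drop_zero]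
      have hc0 : decide (c ≥ k) = false := by simp; omega
      rw [hc0, Bool.false_or, ih 0 le_rfl (by omega), pvGoB_unfold k hk xs]
      congr 1
      simp only [decide_eq_decide]
      omega

lemma pvRunEnd_eq (tmp : List Int) (n j : Nat) (hn : n = tmp.length) :
    pvRunEnd tmp n j = j + pvLeadZeros (tmp.drop j) := by
  fun_induction pvRunEnd tmp n j with
  | case1 j h ih =>
    obtain ⟨hj, hz⟩ := h
    have hjl : j < tmp.length := by omega
    have hd : tmp.drop j = tmp[j] :: tmp.drop (j + 1) := List.drop_eq_getElem_cons hjl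
    have hx : tmp[j] = 0 := by
      have := List.getD_eq_getElem tmp 1 hjl
      omega
    rw [hd, pvLeadZeros, if_pos hx, ih]
    omega
  | case2 j h =>
    by_cases hj : j < n
    · have hz : tmp.getD j 1 ≠ 0 := by tauto
      have hjl : j < tmp.length := by omega
      have hd : tmp.drop j = tmp[j] :: tmp.drop (j + 1) := List.drop_eq_getElem_cons hjl
      have hx : tmp[j] ≠ 0 := by
        have := List.getD_eq_getElem tmp 1 hjl
        omega
      rw [hd, pvLeadZeros, if_neg hx]
      omega
    · have : tmp.drop j = [] := List.drop_eq_nil_of_le (by omega)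
      rw [this]
      rfl

lemma pvLoopB_goB (tmp : List Int) (k : Int) (d : Nat) :
    ∀ i : Nat, d = tmp.length - i → pvLoopB tmp tmp.length k i = pvGoB k (tmp.drop i) := by
  induction d using Nat.strong_induction_on with
  | _ d ih =>
    intro i hd
    rw [pvLoopB]
    by_cases hi : i < tmp.length
    · rw [dif_pos hi]
      show (if ((pvRunEnd tmp tmp.length i : Int) - (i : Int)) ≥ k then true
            else pvLoopB tmp tmp.length k (pvRunEnd tmp tmp.length i + 1)) = _
      have hre := pvRunEnd_eq tmp tmp.length i rfl
      have hnonnil : tmp.drop i ≠ [] := by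
        intro hcon
        have := List.drop_eq_nil_iff.mp hcon
        omega
      rw [pvGoB_unfold' k (tmp.drop i) hnonnil]
      have hcast : ((pvRunEnd tmp tmp.length i : Int) - (i : Int)) = ((pvLeadZeros (tmp.drop i) : Nat) : Int) := by
        rw [hre]; push_cast; ring
      rw [hcast]
      by_cases hk : ((pvLeadZeros (tmp.drop i) : Int) ≥ k)
      · rw [if_pos hk, if_pos hk]
      · rw [if_neg hk, if_neg hk]
        rw [List.drop_drop]
        have harg : pvRunEnd tmp tmp.length i + 1 = i + (pvLeadZeros (tmp.drop i) + 1) := by omega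
        rw [harg]
        exact ih (tmp.length - (i + (pvLeadZeros (tmp.drop i) + 1))) (by omega) _ rfl
    · rw [dif_neg hi]
      have : tmp.drop i = [] := List.drop_eq_nil_of_le (by omega)
      rw [this, pvGoB_nil]

-- ===== VERDICT (by name: the statement is the Claim_ definition above) =====
theorem find_zeroblock_spec : Claim_equal_find_zeroblock := by
  intro tmp k _
  unfold Spec_find_zeroblock find_zeroblock find_zeroblock_alt
  by_cases hk : k ≤ 0
  · rw [if_pos hk, pvAloop_nonpos k hk tmp 0 le_rfl]
  · rw [if_neg hk]
    have hk1 : 1 ≤ k := by omega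
    rw [pvLoopB_goB tmp k (tmp.length - 0) 0 rfl, List.drop_zero]
    rw [pvAloop_goB k hk1 tmp 0 le_rfl (by omega), pvGoB_unfold k hk1 tmp]
    congr 1
    simp only [decide_eq_decide]
    omega
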